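-- pv_equiv track=rewrite | github.com/MPIfR-BDG/mpikat | mpikat/core/utils.py | parse_csv_antennas
-- ===== SOURCE A (Python) =====
-- class AntennaValidationError(Exception):
--     pass
--
-- def parse_csv_antennas(antennas_csv):
--     antennas = antennas_csv.split(",")
--     nantennas = len(antennas)
--     if nantennas == 1 and antennas[0] == '':
--         raise AntennaValidationError("Provided antenna list was empty")
--     names = [antenna.strip() for antenna in antennas]
--     if len(names) != len(set(names)):
--         raise AntennaValidationError("Not all provided antennas were unqiue")
--     return names
-- ===== SOURCE B (Python) =====
-- class AntennaValidationError(Exception):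
--     pass
--
-- def parse_csv_antennas(antennas_csv):
--     if antennas_csv == "":
--         raise AntennaValidationError("Provided antenna list was empty")
--     names = []
--     seen = set()
--     field = []
--     for ch in antennas_csv + ",":
--         if ch != ",":
--             field.append(ch)
--         else:
--             name = "".join(field).strip()
--             if name in seen:
--                 raise AntennaValidationError("Not all provided antennas were unqiue")
--             seen.add(name)
--             names.append(name)
--             field = []
--     return names
-- ===== Notes on version B (the rewrite author's own statement) =====
-- stated objective: alternative
-- what changed: B is a single fused character-level pass with an accumulator (current field, seen-set, output list) that splits, strips and checks uniqueness on the fly, instead of A's staged split / list-comprehension strip / set-cardinality comparison.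
import Mathlib
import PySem

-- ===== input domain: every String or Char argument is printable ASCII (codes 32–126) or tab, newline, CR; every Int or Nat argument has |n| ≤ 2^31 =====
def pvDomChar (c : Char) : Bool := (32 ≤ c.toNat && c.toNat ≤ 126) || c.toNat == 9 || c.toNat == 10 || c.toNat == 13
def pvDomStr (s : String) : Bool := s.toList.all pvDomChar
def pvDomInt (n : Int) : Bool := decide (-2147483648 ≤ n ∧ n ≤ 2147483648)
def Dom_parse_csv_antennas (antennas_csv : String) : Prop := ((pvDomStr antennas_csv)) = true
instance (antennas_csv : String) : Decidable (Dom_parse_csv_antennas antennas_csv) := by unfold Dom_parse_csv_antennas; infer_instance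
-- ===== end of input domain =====

-- B replaces A's staged split/strip/set-cardinality check by one fused character pass with an accumulator; alternative decomposition, same results.


-- ===== PORT A =====
def parse_csv_antennas (antennas_csv : String) : List String :=
  let antennas := (PySem.Chars.splitOn antennas_csv.toList ",".toList).map String.ofList
  let nantennas := antennas.length
  if nantennas = 1 ∧ antennas.headD "" = "" then []  -- raise AntennaValidationError (excluded by Pre_)
  else
    let names := antennas.map (fun antenna => PySem.Str.strip antenna)
    if names.length ≠ (PySem.Set.ofList names).length then []  -- raise AntennaValidationError (excluded by Pre_)
    else names

-- ===== PORT B =====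
-- one step of Source B's loop body; state = (raised-flag, names so far, seen set, current field)
def pvLoopB (st : Bool × List String × PySem.Set String × List Char) (ch : Char) :
    Bool × List String × PySem.Set String × List Char :=
  match st with
  | (err, names, seen, field) =>
    if err then (err, names, seen, field)  -- after the raise nothing more runs
    else if ch ≠ ',' then (err, names, seen, field ++ [ch])
    else
      let name := String.ofList (PySem.Chars.strip field)
      if PySem.Set.contains seen name then (true, names, seen, field)  -- raise: duplicate
      else (err, names ++ [name], PySem.Set.add seen name, [])

def parse_csv_antennas_alt (antennas_csv : String) : List String :=
  if antennas_csv = "" then []  -- raise AntennaValidationError (excluded by Pre_)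
  else
    let st := (antennas_csv.toList ++ ",".toList).foldl pvLoopB (false, [], PySem.Set.empty, [])
    if st.1 then []  -- raise AntennaValidationError (excluded by Pre_)
    else st.2.1

-- ===== PRECONDITION & SPEC =====
-- Pre_ excludes exactly the inputs on which Python A raises AntennaValidationError:
-- the empty string, and strings whose stripped comma-separated fields contain a duplicate.
def Pre_parse_csv_antennas (antennas_csv : String) : Prop :=
  antennas_csv ≠ "" ∧
  (((PySem.Chars.splitOn antennas_csv.toList ",".toList).map String.ofList).map
      (fun antenna => PySem.Str.strip antenna)).Nodup
instance (antennas_csv : String) : Decidable (Pre_parse_csv_antennas antennas_csv) := by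
  unfold Pre_parse_csv_antennas; infer_instance
def pvWitness_parse_csv_antennas : String := "m000, m001"
def Spec_parse_csv_antennas (antennas_csv : String) (out : List String) : Prop := out = parse_csv_antennas_alt antennas_csv
instance (antennas_csv : String) (out : List String) : Decidable (Spec_parse_csv_antennas antennas_csv out) := by unfold Spec_parse_csv_antennas; infer_instance

-- ===== CLAIM (what is proved, stated in full; the proofs are below) =====
def Claim_equal_parse_csv_antennas : Prop := ∀ (antennas_csv : String), Dom_parse_csv_antennas antennas_csv → Pre_parse_csv_antennas antennas_csv → Spec_parse_csv_antennas antennas_csv (parse_csv_antennas antennas_csv)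

-- ===== LEMMAS AND PROOFS =====

-- proof-side recursive description of splitting on ','
def pvFields : List Char → List (List Char)
  | [] => [[]]
  | c :: rest =>
    if c = ',' then [] :: pvFields rest
    else
      match pvFields rest with
      | f :: fs => (c :: f) :: fs
      | [] => [[c]]

lemma pvFields_ne_nil (l : List Char) : pvFields l ≠ [] := by
  cases l with
  | nil => simp [pvFields]
  | cons c rest =>
    simp only [pvFields]
    split
    · simp
    · split <;> simp

lemma splitOn_go_comma (l : List Char) : ∀ (fuel : Nat) (cur : List Char) (acc : List (List Char)),
    l.length < fuel →
    PySem.Chars.splitOn.go [','] fuel l cur acc =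
      acc.reverse ++ ((cur.reverse ++ (pvFields l).headI) :: (pvFields l).tail) := by
  induction l with
  | nil =>
    intro fuel cur acc h
    cases fuel with
    | zero => omega
    | succ f => simp [PySem.Chars.splitOn.go, pvFields]
  | cons c rest ih =>
    intro fuel cur acc h
    cases fuel with
    | zero => simp at h
    | succ f =>
      by_cases hc : c = ','
      · subst hc
        have hpre : [','].isPrefixOf (',' :: rest) = true := by simp [List.isPrefixOf]
        rw [PySem.Chars.splitOn.go]
        simp only [hpre, if_pos]
        rw [show List.drop ([',']).length (',' :: rest) = rest from rfl]
        rw [ih f [] (cur.reverse :: acc) (by simpa using h)]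
        rcases List.exists_cons_of_ne_nil (pvFields_ne_nil rest) with ⟨g, gs, hg⟩
        simp [pvFields, hg]
      · have hpre : [','].isPrefixOf (c :: rest) = false := by
          simp [List.isPrefixOf]; exact fun hb => hc (by simpa using hb.symm)
        rw [PySem.Chars.splitOn.go]
        simp only [hpre, Bool.false_eq_true, if_false]
        rw [ih f (c :: cur) acc (by simpa using h)]
        rcases List.exists_cons_of_ne_nil (pvFields_ne_nil rest) with ⟨g, gs, hg⟩
        simp [pvFields, hc, hg]

lemma splitOn_comma (l : List Char) :
    PySem.Chars.splitOn l [','] = (pvFields l).headI :: (pvFields l).tail := by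
  unfold PySem.Chars.splitOn
  rw [splitOn_go_comma l (l.length + 1) [] [] (by omega)]
  simp

lemma pvFields_eq_single_nil {l : List Char} (h : pvFields l = [[]]) : l = [] := by
  cases l with
  | nil => rfl
  | cons c rest =>
    exfalso
    simp only [pvFields] at h
    split at h
    · exact pvFields_ne_nil rest (by simpa using h)
    · split at h <;> simp_all

-- the stripped name Source B produces from a raw field
def pvStripF (f : List Char) : String := String.ofList (PySem.Chars.strip f)

lemma strip_ofList (f : List Char) :
    PySem.Str.strip (String.ofList f) = pvStripF f := by
  unfold pvStripF
  have h : (PySem.Str.strip (String.ofList f)).toList = PySem.Chars.strip f := by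
    simp
  have h2 := congrArg String.ofList h
  rwa [String.ofList_toList] at h2

-- the fused loop, run to the final flush comma, appends exactly the stripped fields
lemma foldB (l : List Char) :
    ∀ (field : List Char) (names : List String) (seen : PySem.Set String),
    (∀ x, PySem.Set.contains seen x = true ↔ x ∈ names) →
    (names ++ (((field ++ (pvFields l).headI) :: (pvFields l).tail).map pvStripF)).Nodup →
    ((l ++ [',']).foldl pvLoopB (false, names, seen, field)).1 = false ∧
    ((l ++ [',']).foldl pvLoopB (false, names, seen, field)).2.1 =
      names ++ (((field ++ (pvFields l).headI) :: (pvFields l).tail).map pvStripF) := by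
  induction l with
  | nil =>
    intro field names seen hseen hnd
    simp only [pvFields, List.headI, List.tail, List.append_nil, List.nil_append, List.map,
      List.foldl]
    have hmem : pvStripF field ∉ names := by
      simp only [pvFields, List.headI, List.tail, List.append_nil, List.map] at hnd
      have := List.disjoint_of_nodup_append hnd
      intro hx; exact this hx (by simp)
    have hmem2 : String.ofList (PySem.Chars.strip field) ∉ seen := fun hx =>
      hmem ((hseen _).mp ((PySem.Set.contains_iff _ _).mpr hx))
    simp [pvLoopB, pvStripF, hmem2]
  | cons c rest ih =>
    intro field names seen hseen hnd
    rcases List.exists_cons_of_ne_nil (pvFields_ne_nil rest) with ⟨g, gs, hg⟩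
    by_cases hc : c = ','
    · subst hc
      have hF : pvFields (',' :: rest) = [] :: pvFields rest := by simp [pvFields]
      simp only [hF, List.headI, List.tail, List.append_nil, List.map] at hnd ⊢
      -- the first step flushes `field` as a new name
      have hmem : pvStripF field ∉ names := by
        have := List.disjoint_of_nodup_append hnd
        intro hx; exact this hx (by simp)
      have hmem2 : String.ofList (PySem.Chars.strip field) ∉ seen := fun hx =>
        hmem ((hseen _).mp ((PySem.Set.contains_iff _ _).mpr hx))
      have h1 : pvLoopB (false, names, seen, field) ',' =
          (false, names ++ [pvStripF field], PySem.Set.add seen (pvStripF field), []) := by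
        simp [pvLoopB, pvStripF, hmem2]
      rw [List.cons_append, List.foldl_cons, h1]
      have hseen' : ∀ x, PySem.Set.contains (PySem.Set.add seen (pvStripF field)) x = true ↔
          x ∈ names ++ [pvStripF field] := by
        intro x
        rw [PySem.Set.contains_iff, PySem.Set.mem_add]
        simp [← hseen x]
      have hnd' : ((names ++ [pvStripF field]) ++
          ((([] : List Char) ++ (pvFields rest).headI) :: (pvFields rest).tail).map pvStripF).Nodup := by
        simp only [List.nil_append, List.append_assoc, List.cons_append, List.nil_append] at hnd ⊢
        simpa [hg] using hnd
      have := ih [] (names ++ [pvStripF field]) (PySem.Set.add seen (pvStripF field)) hseen' hnd'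
      simpa [hg, List.append_assoc] using this
    · have hF : pvFields (c :: rest) = (c :: g) :: gs := by simp [pvFields, hc, hg]
      have h1 : pvLoopB (false, names, seen, field) c = (false, names, seen, field ++ [c]) := by
        simp [pvLoopB, hc]
      rw [List.cons_append, List.foldl_cons, h1]
      have heq : ((field ++ (pvFields (c :: rest)).headI) :: (pvFields (c :: rest)).tail) =
          (((field ++ [c]) ++ (pvFields rest).headI) :: (pvFields rest).tail) := by
        simp [hF, hg]
      rw [heq] at hnd ⊢
      exact ih (field ++ [c]) names seen hseen hnd

lemma toList_eq_nil_iff (s : String) : s.toList = [] ↔ s = "" := by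
  constructor
  · intro h
    have := congrArg String.ofList h
    simpa using this
  · intro h; simp [h]

-- ===== VERDICT (by name: the statement is the Claim_ definition above) =====
theorem parse_csv_antennas_spec : Claim_equal_parse_csv_antennas := by
  intro s _ hpre
  obtain ⟨hne, hnodup⟩ := hpre
  have hcomma : (",".toList) = [','] := rfl
  have hlist : s.toList ≠ [] := fun h => hne ((toList_eq_nil_iff s).mp h)
  rcases List.exists_cons_of_ne_nil (pvFields_ne_nil s.toList) with ⟨g, gs, hg⟩
  -- A's names, rewritten through pvFields
  have hnamesA :
      (((PySem.Chars.splitOn s.toList ",".toList).map String.ofList).map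
        (fun antenna => PySem.Str.strip antenna)) = (g :: gs).map pvStripF := by
    rw [hcomma, splitOn_comma, hg]
    simp [List.map_map, Function.comp, strip_ofList]
  unfold Spec_parse_csv_antennas parse_csv_antennas parse_csv_antennas_alt
  simp only []
  -- A's empty guard is off
  have hguard : ¬ (((PySem.Chars.splitOn s.toList ",".toList).map String.ofList).length = 1 ∧
      ((PySem.Chars.splitOn s.toList ",".toList).map String.ofList).headD "" = "") := by
    rintro ⟨hlen, hhead⟩
    rw [hcomma, splitOn_comma, hg] at hlen hhead
    have hgs : gs = [] := by simpa using hlen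
    have hgnil : g = [] := by
      have : String.ofList g = "" := by simpa [hgs] using hhead
      have := congrArg String.toList this
      simpa using this
    exact hlist (pvFields_eq_single_nil (by rw [hg, hgnil, hgs]))
  rw [if_neg hguard]
  rw [hnamesA] at hnodup ⊢
  -- A's uniqueness guard is off
  rw [if_neg (by rw [PySem.Set.ofList_eq_self_of_nodup _ hnodup]; simp)]
  -- B's guards are off and its fold produces the same list
  rw [if_neg hne]
  have hfold := foldB s.toList [] [] PySem.Set.empty
    (by intro x; simp [PySem.Set.empty, PySem.Set.contains])
    (by simpa [hg] using hnodup)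
  simp only [hg, List.headI, List.tail, List.nil_append] at hfold
  simp only [hcomma]
  rw [hfold.1, hfold.2]
  simp
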